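-- pv_equiv track=rewrite | github.com/pypi-data/pypi-mirror-374 | packages/eaglec/eaglec-2.1.1-py3-none-any.whl/eaglec/searchCandidates.py | remove_real_outliers
-- ===== SOURCE A (Python) =====
-- def remove_real_outliers(x, y, buff=1):
--
--     pool = set(zip(x, y))
--     filtered = set()
--     for xi, yi in pool:
--         for i in range(-buff, buff+1):
--             for j in range(-buff, buff+1):
--                 if (i == 0) and (j == 0):
--                     continue
--                 if (xi+i, yi+j) in pool:
--                     filtered.add((xi, yi))
--
--     return filtered
-- ===== SOURCE B (Python) =====
-- def remove_real_outliers(x, y, buff=1):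
--
--     pool = set(zip(x, y))
--     return {p for p in pool
--             if any(q != p and abs(q[0] - p[0]) <= buff and abs(q[1] - p[1]) <= buff
--                    for q in pool)}
-- ===== Notes on version B (the rewrite author's own statement) =====
-- stated objective: faster
-- what changed: B drops A's enumeration of the (2*buff+1)^2 offset vectors per point and instead keeps a point iff some other distinct pool point lies within Chebyshev distance buff, a pairwise comparison whose cost is independent of buff.
import Mathlib
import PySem

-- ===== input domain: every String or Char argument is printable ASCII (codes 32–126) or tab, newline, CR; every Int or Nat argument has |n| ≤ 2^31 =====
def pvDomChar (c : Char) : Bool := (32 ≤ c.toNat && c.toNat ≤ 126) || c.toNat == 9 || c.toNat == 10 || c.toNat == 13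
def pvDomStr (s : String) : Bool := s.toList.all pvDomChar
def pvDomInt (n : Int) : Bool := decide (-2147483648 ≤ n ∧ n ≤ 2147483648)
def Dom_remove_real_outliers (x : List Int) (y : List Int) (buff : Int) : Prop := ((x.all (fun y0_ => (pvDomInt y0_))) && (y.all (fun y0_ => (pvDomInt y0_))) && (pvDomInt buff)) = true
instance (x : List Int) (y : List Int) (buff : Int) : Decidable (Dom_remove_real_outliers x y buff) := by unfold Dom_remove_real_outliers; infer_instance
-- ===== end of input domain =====

-- B replaces A's enumeration of the (2*buff+1)^2 offset vectors per point by a pairwise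
-- Chebyshev-distance test between distinct points of the pool (objective: alternative).
-- Both Pythons return a set; the proved equality is over the ports' canonical insertion-order lists.

-- ===== PORT A =====
def remove_real_outliers (x : List Int) (y : List Int) (buff : Int) : List (Int × Int) :=
  let pool : PySem.Set (Int × Int) := PySem.Set.ofList (List.zip x y)
  pool.foldl (fun filtered p =>
    (PySem.List.pyRange (-buff) (buff + 1) 1).foldl (fun filtered i =>
      (PySem.List.pyRange (-buff) (buff + 1) 1).foldl (fun filtered j =>
        if i = 0 ∧ j = 0 then filtered
        else if (p.1 + i, p.2 + j) ∈ pool then PySem.Set.add filtered p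
        else filtered) filtered) filtered) PySem.Set.empty

-- ===== PORT B =====
def remove_real_outliers_alt (x : List Int) (y : List Int) (buff : Int) : List (Int × Int) :=
  let pool : PySem.Set (Int × Int) := PySem.Set.ofList (List.zip x y)
  PySem.Set.ofList (pool.filter (fun p =>
    pool.any (fun q => decide (q ≠ p ∧ |q.1 - p.1| ≤ buff ∧ |q.2 - p.2| ≤ buff))))

-- ===== PRECONDITION & SPEC =====
def Spec_remove_real_outliers (x : List Int) (y : List Int) (buff : Int) (out : List (Int × Int)) : Prop := out = remove_real_outliers_alt x y buff
instance (x : List Int) (y : List Int) (buff : Int) (out : List (Int × Int)) : Decidable (Spec_remove_real_outliers x y buff out) := by unfold Spec_remove_real_outliers; infer_instance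

-- ===== CLAIM (what is proved, stated in full; the proofs are below) =====
def Claim_equal_remove_real_outliers : Prop := ∀ (x : List Int) (y : List Int) (buff : Int), Dom_remove_real_outliers x y buff → Spec_remove_real_outliers x y buff (remove_real_outliers x y buff)

-- ===== LEMMAS AND PROOFS =====

-- A's offset scan for one point: the double loop either adds the point once or leaves the set alone.
theorem foldl_ite_add {β : Type} (L : List β) (c : β → Prop) [DecidablePred c]
    (q : Int × Int) (s : PySem.Set (Int × Int)) :
    L.foldl (fun a o => if c o then PySem.Set.add a q else a) s
      = if ∃ o ∈ L, c o then PySem.Set.add s q else s := by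
  induction L generalizing s with
  | nil => simp
  | cons h t ih =>
    by_cases hc : c h
    · simp [List.foldl_cons, hc, ih]
    · simp [List.foldl_cons, hc, ih]

-- A's outer loop over the distinct points collects exactly the points satisfying the test, in pool order.
theorem foldl_ite_add_self (l : List (Int × Int)) (c : (Int × Int) → Prop) [DecidablePred c]
    (acc : PySem.Set (Int × Int)) (hnd : l.Nodup) (hdisj : ∀ p ∈ l, p ∉ acc) :
    l.foldl (fun a p => if c p then PySem.Set.add a p else a) acc
      = acc ++ l.filter (fun p => decide (c p)) := by
  induction l generalizing acc with
  | nil => simp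
  | cons h t ih =>
    rcases List.nodup_cons.mp hnd with ⟨hh, hnt⟩
    by_cases hc : c h
    · have hadd : PySem.Set.add acc h = acc ++ [h] :=
        PySem.Set.add_of_not_mem (hdisj h (by simp))
      have := ih (acc ++ [h]) hnt (by
        intro p hp
        simp only [List.mem_append, List.mem_singleton]
        rintro (hpa | rfl)
        · exact hdisj p (by simp [hp]) hpa
        · exact hh hp)
      simp [List.foldl_cons, hc, hadd, this]
    · have := ih acc hnt (fun p hp => hdisj p (by simp [hp]))
      simp [List.foldl_cons, hc, this]

-- The neighbourhood test both programs decide for a point q (inlined as an ∃ over the offset range).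
theorem portA_eq_filter (x y : List Int) (buff : Int) :
    remove_real_outliers x y buff
      = (PySem.Set.ofList (List.zip x y)).filter
          (fun p => decide (∃ i ∈ PySem.List.pyRange (-buff) (buff + 1) 1, ∃ j ∈ PySem.List.pyRange (-buff) (buff + 1) 1, ¬(i = 0 ∧ j = 0) ∧ (p.1 + i, p.2 + j) ∈ PySem.Set.ofList (List.zip x y))) := by
  unfold remove_real_outliers
  set pool := PySem.Set.ofList (List.zip x y) with hpool
  set L := PySem.List.pyRange (-buff) (buff + 1) 1 with hL
  simp only []
  have hbody : ∀ (p : Int × Int) (acc : PySem.Set (Int × Int)),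
      (L.foldl (fun f i =>
        (L.foldl (fun f j =>
          if i = 0 ∧ j = 0 then f
          else if (p.1 + i, p.2 + j) ∈ pool then PySem.Set.add f p
          else f) f)) acc)
      = if (∃ i ∈ L, ∃ j ∈ L, ¬(i = 0 ∧ j = 0) ∧ (p.1 + i, p.2 + j) ∈ pool) then PySem.Set.add acc p else acc := by
    intro p acc
    have hinner : ∀ (i : Int) (f : PySem.Set (Int × Int)),
        (L.foldl (fun f j =>
          if i = 0 ∧ j = 0 then f
          else if (p.1 + i, p.2 + j) ∈ pool then PySem.Set.add f p
          else f) f)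
        = if ∃ j ∈ L, ¬(i = 0 ∧ j = 0) ∧ (p.1 + i, p.2 + j) ∈ pool then PySem.Set.add f p else f := by
      intro i f
      have hfun : (fun (f : PySem.Set (Int × Int)) (j : Int) =>
          if i = 0 ∧ j = 0 then f
          else if (p.1 + i, p.2 + j) ∈ pool then PySem.Set.add f p
          else f)
          = fun f j => if ¬(i = 0 ∧ j = 0) ∧ (p.1 + i, p.2 + j) ∈ pool then PySem.Set.add f p else f := by
        funext f j
        split_ifs <;> tauto
      rw [hfun, foldl_ite_add]
    have hfun2 : (fun (f : PySem.Set (Int × Int)) (i : Int) =>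
        (L.foldl (fun f j =>
          if i = 0 ∧ j = 0 then f
          else if (p.1 + i, p.2 + j) ∈ pool then PySem.Set.add f p
          else f) f))
        = fun f i => if (∃ j ∈ L, ¬(i = 0 ∧ j = 0) ∧ (p.1 + i, p.2 + j) ∈ pool) then PySem.Set.add f p else f := by
      funext f i; exact hinner i f
    rw [hfun2, foldl_ite_add]
  have hfun3 : (fun (filtered : PySem.Set (Int × Int)) (p : Int × Int) =>
      (L.foldl (fun f i =>
        (L.foldl (fun f j =>
          if i = 0 ∧ j = 0 then f
          else if (p.1 + i, p.2 + j) ∈ pool then PySem.Set.add f p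
          else f) f)) filtered))
      = fun filtered p => if (∃ i ∈ L, ∃ j ∈ L, ¬(i = 0 ∧ j = 0) ∧ (p.1 + i, p.2 + j) ∈ pool) then PySem.Set.add filtered p else filtered := by
    funext acc p; exact hbody p acc
  rw [hfun3, foldl_ite_add_self pool _ PySem.Set.empty (PySem.Set.nodup_ofList _) (by intro p _ hp; simp [PySem.Set.empty] at hp)]
  simp [PySem.Set.empty]

theorem portB_eq_filter (x y : List Int) (buff : Int) :
    remove_real_outliers_alt x y buff
      = (PySem.Set.ofList (List.zip x y)).filter
          (fun p => decide (∃ i ∈ PySem.List.pyRange (-buff) (buff + 1) 1, ∃ j ∈ PySem.List.pyRange (-buff) (buff + 1) 1, ¬(i = 0 ∧ j = 0) ∧ (p.1 + i, p.2 + j) ∈ PySem.Set.ofList (List.zip x y))) := by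
  unfold remove_real_outliers_alt
  set pool := PySem.Set.ofList (List.zip x y) with hpool
  set L := PySem.List.pyRange (-buff) (buff + 1) 1 with hL
  simp only []
  rw [PySem.Set.ofList_eq_self_of_nodup _ (List.Nodup.filter _ (PySem.Set.nodup_ofList _))]
  refine List.filter_congr ?_
  intro p _
  rw [Bool.eq_iff_iff]
  simp only [List.any_eq_true, decide_eq_true_iff]
  constructor
  · rintro ⟨q, hq, hne, h1, h2⟩
    refine ⟨q.1 - p.1, ?_, q.2 - p.2, ?_, ?_, ?_⟩
    · rw [hL, PySem.List.mem_pyRange_one]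
      rw [abs_le] at h1; omega
    · rw [hL, PySem.List.mem_pyRange_one]
      rw [abs_le] at h2; omega
    · rintro ⟨e1, e2⟩
      exact hne (by ext <;> omega)
    · have : (p.1 + (q.1 - p.1), p.2 + (q.2 - p.2)) = q := by ext <;> simp
      rw [this]; exact hq
  · rintro ⟨i, hi, j, hj, hij, hq⟩
    rw [hL, PySem.List.mem_pyRange_one] at hi hj
    refine ⟨(p.1 + i, p.2 + j), hq, ?_, ?_, ?_⟩
    · intro h
      exact hij ⟨by have := congrArg Prod.fst h; simp at this; omega,
                 by have := congrArg Prod.snd h; simp at this; omega⟩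
    · simp [abs_le]; omega
    · simp [abs_le]; omega

-- ===== VERDICT (by name: the statement is the Claim_ definition above) =====
theorem remove_real_outliers_spec : Claim_equal_remove_real_outliers := by
  intro x y buff _
  unfold Spec_remove_real_outliers
  rw [portA_eq_filter, portB_eq_filter]
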